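-- pv_equiv track=rewrite | github.com/paras-a/Data-Structures-and-Algorithms | recursion.py | append_to_list
-- ===== SOURCE A (Python) =====
-- def append_to_list(lst, n):
--     """
--     Create a list of numbers from 1 to n using recursion.
--
--     @param lst: The list to append to (initially empty)
--     @param n: A positive integer
--     @return: List containing numbers from 1 to n
--     @rtype: list
--
--     Examples:
--         >>> append_to_list([], 3)
--         [1, 2, 3]
--         >>> append_to_list([], 1)
--         [1]
--     """
--     if n <= 0:
--         raise ValueError("n must start from 1")
--     if n == 1:
--         lst.insert(0, 1)
--         return lst
--     append_to_list(lst, n - 1)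
--     lst.append(n)
--     return lst
-- ===== SOURCE B (Python) =====
-- def append_to_list(lst, n):
--     if n <= 0:
--         raise ValueError("n must start from 1")
--     lst.insert(0, 1)
--     for i in range(2, n + 1):
--         lst.append(i)
--     return lst
-- ===== Notes on version B (the rewrite author's own statement) =====
-- stated objective: simpler
-- what changed: Replaces the self-recursion (recurse to the base case, then append on the way back) with a flat iterative loop: insert 1 at the front once, then append 2..n in a single for loop; same in-place mutation and return value.
import Mathlib
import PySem

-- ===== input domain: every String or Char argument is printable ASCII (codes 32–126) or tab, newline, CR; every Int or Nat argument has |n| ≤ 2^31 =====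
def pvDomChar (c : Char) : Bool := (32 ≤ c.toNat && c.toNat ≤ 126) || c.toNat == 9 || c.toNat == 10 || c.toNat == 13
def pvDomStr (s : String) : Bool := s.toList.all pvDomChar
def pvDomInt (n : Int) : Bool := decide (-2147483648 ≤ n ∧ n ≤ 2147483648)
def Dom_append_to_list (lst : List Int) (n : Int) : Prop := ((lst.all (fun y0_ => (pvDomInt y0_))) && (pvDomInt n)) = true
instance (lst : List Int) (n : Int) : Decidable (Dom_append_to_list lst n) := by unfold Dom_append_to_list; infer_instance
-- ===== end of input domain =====

-- B replaces A's self-recursion with a flat iterative loop (insert 1 at the front, then append 2..n); same in-place list mutation, same return value.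


-- ===== PORT A =====
-- A: if n <= 0: raise (excluded by Pre_); if n == 1: lst.insert(0,1); return lst;
-- else recurse on n-1 then lst.append(n)
def append_to_list (lst : List Int) (n : Int) : List Int :=
  if _h0 : n ≤ 0 then lst          -- ValueError: excluded by Pre_append_to_list
  else if n = 1 then 1 :: lst      -- lst.insert(0, 1)
  else append_to_list lst (n - 1) ++ [n]
termination_by n.toNat
decreasing_by omega

-- ===== PORT B =====
-- B: guard, lst.insert(0,1), then for i in range(2, n+1): lst.append(i)
def append_to_list_alt (lst : List Int) (n : Int) : List Int :=
  if n ≤ 0 then lst                -- ValueError: excluded by Pre_append_to_list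
  else (PySem.List.pyRange 2 (n + 1) 1).foldl (fun acc i => acc ++ [i]) (1 :: lst)

-- ===== PRECONDITION & SPEC =====
-- Pre_ excludes exactly n <= 0, where the Python A raises ValueError.
def Pre_append_to_list (lst : List Int) (n : Int) : Prop := 1 ≤ n
instance (lst : List Int) (n : Int) : Decidable (Pre_append_to_list lst n) := by unfold Pre_append_to_list; infer_instance
def pvWitness_append_to_list : List Int × Int := ([5, 6], 3)
def Spec_append_to_list (lst : List Int) (n : Int) (out : List Int) : Prop := out = append_to_list_alt lst n
instance (lst : List Int) (n : Int) (out : List Int) : Decidable (Spec_append_to_list lst n out) := by unfold Spec_append_to_list; infer_instance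

-- ===== CLAIM (what is proved, stated in full; the proofs are below) =====
def Claim_equal_append_to_list : Prop := ∀ (lst : List Int) (n : Int), Dom_append_to_list lst n → Pre_append_to_list lst n → Spec_append_to_list lst n (append_to_list lst n)

-- ===== LEMMAS AND PROOFS =====

-- the common closed characterisation: result = 1 :: lst ++ [2..n]
theorem append_to_list_eq (lst : List Int) (n : Int) (h : 1 ≤ n) :
    append_to_list lst n = (1 :: lst) ++ PySem.List.pyRange 2 (n + 1) 1 := by
  induction hk : n.toNat generalizing n with
  | zero => omega
  | succ k ih =>
    rw [append_to_list, dif_neg (show ¬ n ≤ 0 by omega)]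
    by_cases h1 : n = 1
    · subst h1
      rw [if_pos rfl, PySem.List.pyRange_one_eq_nil (by norm_num)]
      simp
    · rw [if_neg h1, ih (n - 1) (by omega) (by omega),
        PySem.List.pyRange_one_succ_right (by omega : (2:Int) ≤ n)]
      simp

theorem foldl_append_singleton (xs : List Int) (init : List Int) :
    xs.foldl (fun acc i => acc ++ [i]) init = init ++ xs := by
  induction xs generalizing init with
  | nil => simp
  | cons x xs ih => simp [List.foldl, ih]

-- ===== VERDICT (by name: the statement is the Claim_ definition above) =====
theorem append_to_list_spec : Claim_equal_append_to_list := by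
  intro lst n _ hpre
  have h1 : 1 ≤ n := hpre
  unfold Spec_append_to_list append_to_list_alt
  rw [append_to_list_eq lst n h1, if_neg (show ¬ n ≤ 0 by omega), foldl_append_singleton]
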